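-- pv_equiv track=rewrite | github.com/yz4004/codeforce-python | daily/problem_list/2025/1203.py | solve
-- ===== SOURCE A (Python) =====
-- from heapq import heappush, heappop
--
-- mn = lambda x, y: y if x > y else x
--
-- class BIT:  # 1-based
--
--     def __init__(self, n): # [1,n]
--         self.n = n
--         self.tree = [0] * (n + 1)
--
--     def add(self, i, delta): # a[i] += delta
--         n = self.n
--         tree = self.tree
--         while i <= n:
--             tree[i] += delta
--             i += i & -i
--
--     def prefix_sum(self, i): # [1, i]
--         res = 0
--         tree = self.tree
--         while i > 0:
--             res += tree[i]
--             i -= i & -i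
--         return res
--
--     def kth(self, k): # 1-base - k-base
--         idx = 0
--         bit = 1 << (self.n.bit_length() - 1)
--         tree = self.tree
--         while bit:
--             nxt = idx + bit
--             if nxt <= self.n and tree[nxt] < k:
--                 k -= tree[nxt]
--                 idx = nxt
--             bit >>= 1
--         return idx + 1
--
-- def solve(n, a):
--     # ai ...
--     # (x, y)  (y, x)
--
--     # vals = sorted(set(a))
--     # 数据压缩/离散化会导致变形 值域至多n
--
--     # 将 a1 ... an 在第一象限画直方图，以 y=x 分割，则发现下三角需要查询上三角（前缀）
--     # 每当扫到 i 时，对应高度 ai = x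
--     # 对于 min(x, i)，前缀 [1, i] 上有多少个竖线 高度超过 i
--     # 则对于这些线 (j, aj) where aj >= i 有 (j, i) ~ (i, j)
--     # 在 (i, ai = x) 高于 i 的部分，未来也会被作为后面元素的部分，他会在前缀加相应 1 处理成 1
--     # 直到后面查询 >= x 后被删除，当 x = i 时，删除前缀位置 i 处的 1，删除队列记录信息 (x, i)
--
--     tree = BIT(n+1)
--     rmv = []   # 标记删除位置
--     res = 0
--
--     for i in range(1, n+1):
--
--         x = mn(a[i-1], n)
--         # [1, x]
--
--         if x >= i:
--             # 当前竖线高于对角线，只查询低于对角线的部分，高于对角线的部分会被未来的查询访问到 并记录删除位置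
--             # [1, i-1]
--             res += tree.prefix_sum(i)   # 查询 [1, i-1] 上的前缀
--             tree.add(i, 1)
--
--             # [i, x]
--             heappush(rmv,  (x, i))   # 删除时刻 + 位置
--
--         else:
--             # 低于对角线 只查询 [1,x] 部分
--             res += tree.prefix_sum(x)  # x] 查询 [1, x] 上的前缀
--
--         while rmv and rmv[0][0] == i:
--             x, j = heappop(rmv)
--             tree.add(j, -1)
--     return res
-- ===== SOURCE B (Python) =====
-- def solve(n, a):
--     # Direct count of the closed-form pair characterization:
--     # pairs (j, i) with 1 <= j < i <= n, a[j-1] >= i and a[i-1] >= j,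
--     # i.e. for each i count j in [1, min(a[i-1], i-1)] with a[j-1] >= i.
--     res = 0
--     for i in range(1, n + 1):
--         m = min(a[i - 1], i - 1)
--         for j in range(1, m + 1):
--             if a[j - 1] >= i:
--                 res += 1
--     return res
-- ===== Notes on version B (the rewrite author's own statement) =====
-- stated objective: simpler
-- what changed: B drops the Fenwick tree and the heap of scheduled removals entirely: the answer is computed directly from the closed-form pair characterization res = #{(j,i) : 1 <= j < i <= n, a[j-1] >= i, a[i-1] >= j} with two plain nested loops (for each i, count j in [1, min(a[i-1], i-1)] with a[j-1] >= i).
import Mathlib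
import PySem

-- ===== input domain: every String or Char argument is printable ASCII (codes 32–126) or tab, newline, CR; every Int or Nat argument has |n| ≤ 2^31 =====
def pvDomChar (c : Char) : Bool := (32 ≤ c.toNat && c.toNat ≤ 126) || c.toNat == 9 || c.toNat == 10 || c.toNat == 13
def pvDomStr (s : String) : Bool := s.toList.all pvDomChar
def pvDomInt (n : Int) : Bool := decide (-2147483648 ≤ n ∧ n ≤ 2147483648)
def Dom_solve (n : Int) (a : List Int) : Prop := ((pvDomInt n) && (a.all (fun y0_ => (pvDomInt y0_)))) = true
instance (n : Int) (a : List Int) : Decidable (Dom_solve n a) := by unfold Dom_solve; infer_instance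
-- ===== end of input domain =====

-- B drops A's Fenwick tree and heap of scheduled removals entirely: it counts the
-- pairs directly from the closed-form characterization res = #{(j,i) : j < i, a[j-1] >= i, a[i-1] >= j}
-- with two plain nested loops (simpler code; quadratic instead of A's O(n log n)).


-- ===== PORT A =====
-- BIT.add: while i <= n: tree[i] += delta; i += i & -i   (fuel makes the while total; always sufficient since i grows by i&-i ≥ 1)
def bitAddA : Nat → Int → List Int → Int → Int → List Int
  | 0, _, tree, _, _ => tree
  | fuel + 1, bn, tree, i, d =>
    if i ≤ bn then
      bitAddA fuel bn (tree.set i.toNat (tree.getD i.toNat 0 + d)) (i + PySem.Int.band i (-i)) d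
    else tree

-- BIT.prefix_sum: res = 0; while i > 0: res += tree[i]; i -= i & -i
def bitSumA : Nat → List Int → Int → Int
  | 0, _, _ => 0
  | fuel + 1, tree, i =>
    if 0 < i then tree.getD i.toNat 0 + bitSumA fuel tree (i - PySem.Int.band i (-i)) else 0

-- heappush on a heap of distinct int pairs, modelled by its observable contract:
-- a list kept sorted by the tuple order (rmv[0] = min, heappop = drop head)
def pvLeB (p q : Int × Int) : Bool := p.1 < q.1 || (p.1 == q.1 && p.2 ≤ q.2)

def heapPush (p : Int × Int) : List (Int × Int) → List (Int × Int)
  | [] => [p]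
  | q :: rest => if pvLeB p q then p :: q :: rest else q :: heapPush p rest

-- while rmv and rmv[0][0] == i: x, j = heappop(rmv); tree.add(j, -1)
def popA : Nat → Int → Int → List Int → List (Int × Int) → List Int × List (Int × Int)
  | 0, _, _, tree, rmv => (tree, rmv)
  | fuel + 1, bn, i, tree, rmv =>
    match rmv with
    | [] => (tree, [])
    | (x, j) :: rest =>
      if x = i then popA fuel bn i (bitAddA (bn + 1 - j).toNat bn tree j (-1)) rest
      else (tree, (x, j) :: rest)

-- one iteration of A's main for-loop; state = (tree, rmv, res)
def stepA (n : Int) (a : List Int) (s : List Int × List (Int × Int) × Int) (i : Int) :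
    List Int × List (Int × Int) × Int :=
  let ai := PySem.List.pyGetD a (i - 1) 0
  let x := if ai > n then n else ai        -- mn(a[i-1], n)
  if i ≤ x then
    let res' := s.2.2 + bitSumA (i.toNat + 1) s.1 i
    let tree' := bitAddA (n + 2 - i).toNat (n + 1) s.1 i 1
    let rmv' := heapPush (x, i) s.2.1
    let pr := popA rmv'.length (n + 1) i tree' rmv'
    (pr.1, pr.2, res')
  else
    let res' := s.2.2 + bitSumA (x.toNat + 1) s.1 x
    let pr := popA s.2.1.length (n + 1) i s.1 s.2.1
    (pr.1, pr.2, res')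

def solve (n : Int) (a : List Int) : Int :=
  ((PySem.List.pyRange 1 (n + 1) 1).foldl (stepA n a)
    (List.replicate (n + 2).toNat 0, [], 0)).2.2

-- ===== PORT B =====
-- one iteration of B's outer loop: m = min(a[i-1], i-1); for j in 1..m: count a[j-1] >= i
def stepB (n : Int) (a : List Int) (res i : Int) : Int :=
  let ai := PySem.List.pyGetD a (i - 1) 0
  let m := if ai < i - 1 then ai else i - 1
  (PySem.List.pyRange 1 (m + 1) 1).foldl
    (fun r j => if PySem.List.pyGetD a (j - 1) 0 ≥ i then r + 1 else r) res

def solve_alt (n : Int) (a : List Int) : Int :=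
  (PySem.List.pyRange 1 (n + 1) 1).foldl (stepB n a) 0

-- ===== PRECONDITION & SPEC =====
-- a[i-1] is read for every i in 1..n, so A (and B) raise IndexError iff n > len(a)
def Pre_solve (n : Int) (a : List Int) : Prop := n ≤ (a.length : Int)
instance (n : Int) (a : List Int) : Decidable (Pre_solve n a) := by unfold Pre_solve; infer_instance
def pvWitness_solve : Int × List Int := (3, [2, 3, 1])

def Spec_solve (n : Int) (a : List Int) (out : Int) : Prop := out = solve_alt n a
instance (n : Int) (a : List Int) (out : Int) : Decidable (Spec_solve n a out) := by unfold Spec_solve; infer_instance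

-- ===== CLAIM (what is proved, stated in full; the proofs are below) =====
def Claim_equal_solve : Prop := ∀ (n : Int) (a : List Int), Dom_solve n a → Pre_solve n a → Spec_solve n a (solve n a)

-- ===== LEMMAS AND PROOFS =====

theorem two_bit_land (a b ca cb : Nat) (hca : ca ≤ 1) (hcb : cb ≤ 1) :
    ((2*a + ca) &&& (2*b + cb)) = 2*(a &&& b) + ca * cb := by
  apply Nat.eq_of_testBit_eq
  intro i
  cases i with
  | zero =>
    rw [Nat.testBit_land]
    simp only [Nat.testBit_zero]
    have h1 : (2*a + ca) % 2 = ca := by omega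
    have h2 : (2*b + cb) % 2 = cb := by omega
    have h3 : (2*(a &&& b) + ca * cb) % 2 = ca * cb := by
      interval_cases ca <;> interval_cases cb <;> omega
    rw [h1, h2, h3]
    interval_cases ca <;> interval_cases cb <;> simp
  | succ i =>
    rw [Nat.testBit_land, Nat.testBit_succ, Nat.testBit_succ, Nat.testBit_succ]
    have h1 : (2*a + ca) / 2 = a := by omega
    have h2 : (2*b + cb) / 2 = b := by omega
    have h3 : (2*(a &&& b) + ca * cb) / 2 = a &&& b := by
      interval_cases ca <;> interval_cases cb <;> omega
    rw [h1, h2, h3, Nat.testBit_land]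

def lbN (m : Nat) : Nat := m - (m &&& (m - 1))

theorem lbN_odd (m : Nat) (h : m % 2 = 1) : lbN m = 1 := by
  have hm : m = 2*(m/2) + 1 := by omega
  unfold lbN
  rw [hm]
  have : 2*(m/2) + 1 - 1 = 2*(m/2) + 0 := by omega
  rw [this, two_bit_land _ _ 1 0 (by omega) (by omega)]
  have : m/2 &&& m/2 = m/2 := Nat.and_self _
  omega

theorem lbN_even (m : Nat) (h0 : 0 < m) (h : m % 2 = 0) : lbN m = 2 * lbN (m/2) := by
  have hm : m = 2*(m/2) + 0 := by omega
  have h2 : 0 < m / 2 := by omega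
  unfold lbN
  conv_lhs => rw [hm]
  have : 2*(m/2) + 0 - 1 = 2*(m/2 - 1) + 1 := by omega
  rw [this, two_bit_land _ _ 0 1 (by omega) (by omega)]
  omega

theorem land_le_right (a b : Nat) : a &&& b ≤ b := Nat.and_le_right

theorem lbN_pos (m : Nat) (h : 0 < m) : 0 < lbN m := by
  unfold lbN
  have := land_le_right m (m - 1)
  omega

theorem lbN_le (m : Nat) : lbN m ≤ m := by
  unfold lbN; omega

theorem lbN_two (m : Nat) (h0 : 0 < m) (h : m % 2 = 0) : lbN m % 2 = 0 ∧ 2 ≤ lbN m := by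
  rw [lbN_even m h0 h]
  have := lbN_pos (m/2) (by omega)
  omega

theorem lb_step (q : Nat) : ∀ j, 0 < j → j < q → q - lbN q < j → j + lbN j ≤ q := by
  induction q using Nat.strong_induction_on with
  | _ q ih =>
    intro j hj hjq hlow
    rcases Nat.mod_two_eq_zero_or_one q with hq | hq
    · rcases Nat.mod_two_eq_zero_or_one j with hjp | hjp
      · -- both even
        have hq2 : q % 2 = 0 := by omega
        have hj2 : j % 2 = 0 := by omega
        have hq0 : 0 < q := by omega
        have e1 := lbN_even q hq0 hq2
        have e2 := lbN_even j hj hj2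
        have hql := lbN_le (q/2)
        have h := ih (q/2) (by omega) (j/2) (by omega) (by omega) (by omega)
        omega
      · have := lbN_odd j (by omega)
        omega
    · have := lbN_odd q (by omega)
      omega

theorem lb_skip (q : Nat) : ∀ c, 0 < c → 0 < q → c ≤ q - lbN q → q - lbN q < c + lbN c →
    q < c + lbN c := by
  induction q using Nat.strong_induction_on with
  | _ q ih =>
    intro c hc hq h1 h2
    have hql := lbN_le q
    have hqp := lbN_pos q hq
    rcases Nat.mod_two_eq_zero_or_one q with hqe | hqe
    · rcases Nat.mod_two_eq_zero_or_one c with hce | hce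
      · -- both even
        have hq2 : q % 2 = 0 := by omega
        have hc2 : c % 2 = 0 := by omega
        have e1 := lbN_even q hq hq2
        have e2 := lbN_even c hc hc2
        have hql2 := lbN_le (q/2)
        have h := ih (q/2) (by omega) (c/2) (by omega) (by omega) (by omega) (by omega)
        omega
      · -- c odd: c = q - lbN q forced, parity contradiction
        have hlc := lbN_odd c (by omega)
        have := lbN_two q hq (by omega)
        omega
    · -- q odd
      have hlq := lbN_odd q (by omega)
      rcases Nat.mod_two_eq_zero_or_one c with hce | hce
      · have := lbN_two c hc (by omega)
        omega
      · have := lbN_odd c (by omega)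
        omega

def lbI (i : Int) : Int := PySem.Int.band i (-i)

theorem lbI_eq (i : Int) (h : 0 < i) : lbI i = (lbN i.toNat : Int) := by
  unfold lbI lbN
  rw [PySem.Int.band]
  have h1 : 0 ≤ i := by omega
  have h2 : ¬ (0 ≤ -i) := by omega
  simp only [h1, h2, if_true, if_false]
  have h3 : (-(-i) - 1).toNat = i.toNat - 1 := by omega
  rw [h3]

theorem lbI_pos (i : Int) (h : 0 < i) : 0 < lbI i := by
  rw [lbI_eq i h]
  have := lbN_pos i.toNat (by omega)
  omega

theorem lbI_le (i : Int) (h : 0 < i) : lbI i ≤ i := by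
  rw [lbI_eq i h]
  have := lbN_le i.toNat
  omega

theorem lbI_step (q j : Int) (hj : 0 < j) (hjq : j < q) (hlow : q - lbI q < j) :
    j + lbI j ≤ q := by
  have hq : 0 < q := by omega
  rw [lbI_eq j hj] at *
  rw [lbI_eq q hq] at hlow
  have := lb_step q.toNat j.toNat (by omega) (by omega) (by omega)
  omega

theorem lbI_skip (q c : Int) (hc : 0 < c) (hq : 0 < q) (h1 : c ≤ q - lbI q)
    (h2 : q - lbI q < c + lbI c) : q < c + lbI c := by
  rw [lbI_eq c hc] at *
  rw [lbI_eq q hq] at *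
  have hl := lbN_le q.toNat
  have := lb_skip q.toNat c.toNat (by omega) (by omega) (by omega) (by omega)
  omega

theorem band_eq_lbI (i : Int) : PySem.Int.band i (-i) = lbI i := rfl

-- (A1) length preserved
theorem bitAddA_length (fuel : Nat) : ∀ (bn : Int) (tree : List Int) (i d : Int),
    (bitAddA fuel bn tree i d).length = tree.length := by
  induction fuel with
  | zero => intro bn tree i d; rfl
  | succ f ih =>
    intro bn tree i d
    simp only [bitAddA]
    split
    · rw [ih]; simp
    · rfl

-- (A2) positions strictly below j are untouched
theorem bitAddA_low (fuel : Nat) : ∀ (bn : Int) (tree : List Int) (j d : Int) (k : Nat),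
    0 < j → (k : Int) < j →
    (bitAddA fuel bn tree j d).getD k 0 = tree.getD k 0 := by
  induction fuel with
  | zero => intro bn tree j d k _ _; rfl
  | succ f ih =>
    intro bn tree j d k hj hk
    simp only [bitAddA]
    split
    · have hlb := lbI_pos j hj
      rw [ih bn _ (j + PySem.Int.band j (-j)) d k (by rw [band_eq_lbI]; omega)
            (by rw [band_eq_lbI]; omega)]
      have hne : j.toNat ≠ k := by omega
      simp [List.getD_eq_getElem?_getD, hne]
    · rfl

-- (A3) a chain starting at j ≤ q - lb q never writes q
theorem bitAddA_avoid (fuel : Nat) : ∀ (bn : Int) (tree : List Int) (j d q : Int),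
    0 < j → 0 < q → j ≤ q - lbI q →
    (bitAddA fuel bn tree j d).getD q.toNat 0 = tree.getD q.toNat 0 := by
  induction fuel with
  | zero => intro bn tree j d q _ _ _; rfl
  | succ f ih =>
    intro bn tree j d q hj hq hjq
    have hlbq := lbI_pos q hq
    have hlbq2 := lbI_le q hq
    simp only [bitAddA]
    split
    · have hlbj := lbI_pos j hj
      have hset : (tree.set j.toNat (tree.getD j.toNat 0 + d)).getD q.toNat 0 = tree.getD q.toNat 0 := by
        have hne : j.toNat ≠ q.toNat := by omega
        simp [List.getD_eq_getElem?_getD, hne]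
      rw [band_eq_lbI]
      by_cases hnext : j + lbI j ≤ q - lbI q
      · rw [ih bn _ (j + lbI j) d q (by omega) hq hnext, hset]
      · have hskip : q < j + lbI j := lbI_skip q j hj hq hjq (by omega)
        rw [bitAddA_low f bn _ (j + lbI j) d q.toNat (by omega) (by omega), hset]
    · rfl

-- (A4) a chain starting in (q - lb q, q] writes q exactly once
theorem bitAddA_hit (fuel : Nat) : ∀ (bn : Int) (tree : List Int) (j d q : Int),
    0 < j → q - lbI q < j → j ≤ q → q ≤ bn → q.toNat < tree.length →
    (q - j).toNat < fuel →
    (bitAddA fuel bn tree j d).getD q.toNat 0 = tree.getD q.toNat 0 + d := by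
  induction fuel with
  | zero => intro bn tree j d q _ _ _ _ _ h; omega
  | succ f ih =>
    intro bn tree j d q hj hlow hjq hqbn hqlen hfuel
    have hlbq := lbI_pos q (by omega)
    have hlbj := lbI_pos j hj
    simp only [bitAddA]
    rw [if_pos (by omega)]
    rw [band_eq_lbI]
    by_cases hje : j = q
    · subst hje
      rw [bitAddA_low f bn _ (j + lbI j) d j.toNat (by omega) (by omega)]
      have hlt : j.toNat < tree.length := hqlen
      simp [List.getD_eq_getElem?_getD, hlt]
    · have hjlt : j < q := by omega
      have hstep : j + lbI j ≤ q := lbI_step q j hj hjlt hlow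
      have hset : (tree.set j.toNat (tree.getD j.toNat 0 + d)).getD q.toNat 0 = tree.getD q.toNat 0 := by
        have hne : j.toNat ≠ q.toNat := by omega
        simp [List.getD_eq_getElem?_getD, hne]
      rw [ih bn _ (j + lbI j) d q (by omega) (by omega) hstep hqbn
            (by rw [List.length_set]; omega) (by omega), hset]

-- (A5) bitSum only reads positions ≤ q
theorem bitSumA_congr (fuel : Nat) : ∀ (tree tree' : List Int) (q : Int),
    (∀ k : Nat, (k : Int) ≤ q → tree.getD k 0 = tree'.getD k 0) →
    bitSumA fuel tree q = bitSumA fuel tree' q := by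
  induction fuel with
  | zero => intro tree tree' q _; rfl
  | succ f ih =>
    intro tree tree' q h
    simp only [bitSumA]
    split
    · rename_i hq
      have hlb := lbI_pos q hq
      have hle := lbI_le q hq
      rw [h q.toNat (by omega), ih tree tree' (q - PySem.Int.band q (-q))
            (fun k hk => h k (by rw [band_eq_lbI] at hk; omega))]
    · rfl

-- (A6) sum over the all-zero tree
theorem bitSumA_zero (fuel : Nat) : ∀ (tree : List Int) (q : Int),
    (∀ k : Nat, tree.getD k 0 = 0) → bitSumA fuel tree q = 0 := by
  induction fuel with
  | zero => intro tree q _; rfl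
  | succ f ih =>
    intro tree q h
    simp only [bitSumA]
    split
    · rw [h, ih tree _ h]
      omega
    · rfl

-- (C) query/update commutation: the heart of the Fenwick argument
theorem bit_comm : ∀ (k : Nat) (q : Int), q.toNat = k → ∀ (j d bn : Int) (tree : List Int) (fs fa : Nat),
    0 ≤ q → q ≤ bn → 0 < j → j ≤ bn → (tree.length : Int) = bn + 1 →
    q.toNat < fs → (q - j).toNat < fa →
    bitSumA fs (bitAddA fa bn tree j d) q = bitSumA fs tree q + (if j ≤ q then d else 0) := by
  intro k
  induction k using Nat.strong_induction_on with
  | _ k ih =>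
    intro q hk j d bn tree fs fa hq0 hqbn hj hjbn hlen hfs hfa
    by_cases hq : 0 < q
    · have hlbq := lbI_pos q hq
      have hlbqle := lbI_le q hq
      match fs with
      | fs + 1 =>
        by_cases hcase : q < j
        · -- (a) update entirely above the query
          rw [if_neg (by omega), add_zero]
          exact bitSumA_congr (fs+1) _ tree q
            (fun kk hkk => bitAddA_low fa bn tree j d kk hj (by omega))
        · by_cases hlowcase : j ≤ q - lbI q
          · -- (b) update at or below q - lb q : recursion carries it
            simp only [bitSumA]
            rw [if_pos hq, if_pos hq]
            rw [bitAddA_avoid fa bn tree j d q hj hq hlowcase]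
            rw [band_eq_lbI]
            have hrec := ih (q - lbI q).toNat (by omega) (q - lbI q) rfl j d bn tree fs fa
              (by omega) (by omega) hj hjbn hlen (by omega) (by omega)
            rw [hrec, if_pos (by omega), if_pos (by omega)]
            ring
          · -- (c) q is written once; recursion below j is untouched
            simp only [bitSumA]
            rw [if_pos hq, if_pos hq]
            rw [bitAddA_hit fa bn tree j d q hj (by omega) (by omega) hqbn (by omega) hfa]
            rw [band_eq_lbI]
            rw [bitSumA_congr fs _ tree (q - lbI q)
              (fun kk hkk => bitAddA_low fa bn tree j d kk hj (by omega))]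
            rw [if_pos (by omega)]
            ring
    · -- q = 0
      have hq0' : q = 0 := by omega
      subst hq0'
      match fs with
      | fs + 1 =>
        simp only [bitSumA]
        rw [if_neg (by omega), if_neg (by omega), if_neg (by omega)]
        simp

-- strict lexicographic order on the heap entries (all entries are distinct)
def pvLt (p q : Int × Int) : Prop := p.1 < q.1 ∨ (p.1 = q.1 ∧ p.2 < q.2)

theorem heapPush_mem (p r : Int × Int) : ∀ (l : List (Int × Int)),
    r ∈ heapPush p l ↔ r = p ∨ r ∈ l := by
  intro l; induction l with
  | nil => simp [heapPush]
  | cons q rest ih =>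
    simp only [heapPush]
    split
    · simp
    · simp [ih]; tauto

theorem heapPush_pairwise (p : Int × Int) : ∀ (l : List (Int × Int)),
    List.Pairwise pvLt l → (∀ q ∈ l, q.2 < p.2) → List.Pairwise pvLt (heapPush p l) := by
  intro l; induction l with
  | nil => intro _ _; simp [heapPush]
  | cons q rest ih =>
    intro hp hs
    rw [List.pairwise_cons] at hp
    simp only [heapPush]
    split
    · rename_i hle
      have hq : pvLt p q := by
        simp only [pvLeB, Bool.or_eq_true, decide_eq_true_eq, Bool.and_eq_true, beq_iff_eq] at hle
        have := hs q (by simp)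
        unfold pvLt; omega
      refine List.pairwise_cons.2 ⟨?_, List.pairwise_cons.2 ⟨hp.1, hp.2⟩⟩
      intro r hr
      rcases List.mem_cons.1 hr with h | h
      · exact h ▸ hq
      · have := hp.1 r h
        unfold pvLt at *; omega
    · rename_i hle
      have hq : pvLt q p := by
        simp only [pvLeB, Bool.or_eq_true, decide_eq_true_eq, Bool.and_eq_true, beq_iff_eq] at hle
        have := hs q (by simp)
        unfold pvLt; omega
      refine List.pairwise_cons.2 ⟨?_, ih hp.2 (fun r hr => hs r (by simp [hr]))⟩
      intro r hr
      rw [heapPush_mem] at hr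
      rcases hr with h | h
      · exact h ▸ hq
      · exact hp.1 r h

-- a pvLt-sorted list whose entries all have first component ≥ i splits as
-- (block with fst = i) ++ (rest with fst > i)
theorem sorted_split (i : Int) : ∀ (l : List (Int × Int)),
    List.Pairwise pvLt l → (∀ q ∈ l, i ≤ q.1) →
    l = l.filter (fun q => q.1 == i) ++ l.filter (fun q => q.1 != i) ∧
    (∀ q ∈ l.filter (fun q => q.1 != i), i + 1 ≤ q.1) := by
  intro l; induction l with
  | nil => intro _ _; simp
  | cons q rest ih =>
    intro hp hb
    rw [List.pairwise_cons] at hp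
    obtain ⟨ih1, ih2⟩ := ih hp.2 (fun r hr => hb r (by simp [hr]))
    by_cases hq : q.1 = i
    · constructor
      · simp only [List.filter_cons, hq]
        simpa using ih1
      · intro r hr
        simp only [List.filter_cons] at hr
        have : (q.1 != i) = false := by simp [hq]
        rw [this] at hr
        exact ih2 r hr
    · have hqi : i + 1 ≤ q.1 := by have := hb q (by simp); omega
      have hrest : ∀ r ∈ rest, i + 1 ≤ r.1 ∧ r.1 ≠ i := by
        intro r hr
        have := hp.1 r hr; unfold pvLt at this
        constructor <;> omega
      have hfe : rest.filter (fun q => q.1 == i) = [] := by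
        rw [List.filter_eq_nil_iff]
        intro r hr
        have := (hrest r hr).2; simp; omega
      have hne : (q.1 == i) = false := by simp [hq]
      have hne' : (q.1 != i) = true := by simp [hq]
      have hself : rest.filter (fun q => q.1 != i) = rest := by
        rw [List.filter_eq_self]
        intro r hr
        have := (hrest r hr).2; simp [this]
      constructor
      · simp only [List.filter_cons, hne, hne']
        simp [hfe, hself]
      · intro r hr
        simp only [List.filter_cons, hne'] at hr
        simp only [if_true] at hr
        rcases List.mem_cons.1 hr with h | h
        · exact h ▸ hqi
        · exact ih2 r h

theorem popA_spec (bn i : Int) : ∀ (l₁ l₂ : List (Int × Int)) (fuel : Nat) (tree : List Int),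
    (∀ p ∈ l₁, p.1 = i) → (∀ p ∈ l₂, p.1 ≠ i) → l₁.length ≤ fuel →
    popA fuel bn i tree (l₁ ++ l₂) =
      (l₁.foldl (fun tr p => bitAddA (bn + 1 - p.2).toNat bn tr p.2 (-1)) tree, l₂) := by
  intro l₁
  induction l₁ with
  | nil =>
    intro l₂ fuel tree _ h2 _
    match l₂, fuel with
    | [], 0 => rfl
    | [], f + 1 => rfl
    | (x, j) :: r, 0 => rfl
    | (x, j) :: r, f + 1 =>
      have : x ≠ i := h2 (x, j) (by simp)
      simp [popA, this]
  | cons p r ih =>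
    intro l₂ fuel tree h1 h2 hf
    obtain ⟨x, j⟩ := p
    have hx : x = i := h1 (x, j) (by simp)
    match fuel with
    | f + 1 =>
      simp only [List.cons_append, popA, hx, List.foldl_cons]
      exact ih l₂ f _ (fun q hq => h1 q (by simp [hq])) h2 (by simpa using hf)

-- the clamped heights x_j = min(a[j-1], n) that both programs compare against
def xvF (n : Int) (a : List Int) (j : Int) : Int :=
  if PySem.List.pyGetD a (j - 1) 0 > n then n else PySem.List.pyGetD a (j - 1) 0

-- number of active lines: j in [1, i) with j ≤ q and x_j ≥ i
def cntF (n : Int) (a : List Int) (i q : Int) : Int :=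
  ((PySem.List.pyRange 1 i 1).countP (fun j => decide (j ≤ q ∧ i ≤ xvF n a j)) : Int)

-- the coupling invariant at the start of iteration i
def InvA (n : Int) (a : List Int) (i : Int) (tree : List Int) (rmv : List (Int × Int)) : Prop :=
  (tree.length : Int) = n + 2 ∧
  (∀ q : Int, 0 ≤ q → q ≤ n + 1 → bitSumA (q.toNat + 1) tree q = cntF n a i q) ∧
  List.Pairwise pvLt rmv ∧
  (∀ p : Int × Int, p ∈ rmv ↔ 1 ≤ p.2 ∧ p.2 < i ∧ p.1 = xvF n a p.2 ∧ i ≤ p.1)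

theorem popfold_length (P : List (Int × Int)) : ∀ (bn : Int) (tree : List Int),
    (P.foldl (fun tr p => bitAddA (bn + 1 - p.2).toNat bn tr p.2 (-1)) tree).length = tree.length := by
  induction P with
  | nil => intro bn tree; rfl
  | cons p rest ih =>
    intro bn tree
    simp only [List.foldl_cons]
    rw [ih, bitAddA_length]

theorem popfold_sum (P : List (Int × Int)) : ∀ (bn : Int) (tree : List Int) (q : Int),
    (tree.length : Int) = bn + 1 → (∀ p ∈ P, 1 ≤ p.2 ∧ p.2 ≤ bn) → 0 ≤ q → q ≤ bn →
    bitSumA (q.toNat + 1) (P.foldl (fun tr p => bitAddA (bn + 1 - p.2).toNat bn tr p.2 (-1)) tree) q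
      = bitSumA (q.toNat + 1) tree q - (P.countP (fun p => decide (p.2 ≤ q)) : Int) := by
  induction P with
  | nil => intro bn tree q _ _ _ _; simp
  | cons p rest ih =>
    intro bn tree q hlen hb hq0 hqbn
    obtain ⟨hp1, hp2⟩ := hb p (by simp)
    simp only [List.foldl_cons]
    rw [ih bn _ q (by rw [bitAddA_length]; exact hlen)
          (fun r hr => hb r (by simp [hr])) hq0 hqbn]
    rw [bit_comm q.toNat q rfl p.2 (-1) bn tree (q.toNat + 1) ((bn + 1 - p.2).toNat)
          hq0 hqbn hp1 hp2 hlen (by omega) (by omega)]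
    rw [List.countP_cons]
    by_cases hple : p.2 ≤ q
    · simp only [hple, decide_true, if_pos]
      push_cast
      ring
    · simp only [hple, decide_false, if_false]
      push_cast
      ring

-- countP of a predicate that is the disjoint union of two others
theorem countP_split {α : Type} (p q r : α → Bool) : ∀ (l : List α),
    (∀ x ∈ l, (p x = true ↔ (q x = true ∨ r x = true)) ∧ ¬(q x = true ∧ r x = true)) →
    l.countP p = l.countP q + l.countP r := by
  intro l
  induction l with
  | nil => intro _; simp
  | cons x rest ih =>
    intro h
    obtain ⟨h1, h2⟩ := h x (by simp)
    simp only [List.countP_cons]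
    rw [ih (fun y hy => h y (by simp [hy]))]
    by_cases hqx : q x = true <;> by_cases hrx : r x = true
    · exact absurd ⟨hqx, hrx⟩ h2
    · have hpx : p x = true := h1.2 (Or.inl hqx)
      simp [hpx, hqx, hrx]
      omega
    · have hpx : p x = true := h1.2 (Or.inr hrx)
      simp [hpx, hqx, hrx]
      omega
    · have hpx : p x ≠ true := fun hh => by
        rcases h1.1 hh with h' | h'
        · exact hqx h'
        · exact hrx h'
      simp [hpx, hqx, hrx]

theorem pairwise_nodup (l : List (Int × Int)) (h : List.Pairwise pvLt l) : l.Nodup := by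
  refine h.imp ?_
  intro p q hlt
  unfold pvLt at hlt
  intro he
  rw [he] at hlt
  omega

-- the central counting identity: activating line i and killing the lines that expire at time i
theorem key_ident (n : Int) (a : List Int) (i q : Int) (h1 : 1 ≤ i) :
    cntF n a i q + (if i ≤ q ∧ i ≤ xvF n a i then 1 else 0)
      = cntF n a (i + 1) q
        + ((PySem.List.pyRange 1 (i + 1) 1).countP (fun j => decide (j ≤ q ∧ xvF n a j = i)) : Int) := by
  have hsucc := PySem.List.pyRange_one_succ_right (a := 1) (b := i) h1
  unfold cntF
  rw [hsucc, List.countP_append, List.countP_append]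
  rw [countP_split (fun j => decide (j ≤ q ∧ i ≤ xvF n a j))
      (fun j => decide (j ≤ q ∧ i + 1 ≤ xvF n a j))
      (fun j => decide (j ≤ q ∧ xvF n a j = i))
      (PySem.List.pyRange 1 i 1)
      (by
        intro x _
        constructor
        · simp only [decide_eq_true_eq]
          omega
        · simp only [decide_eq_true_eq]
          omega)]
  simp only [List.countP_cons, List.countP_nil]
  push_cast
  simp only [decide_eq_true_eq]
  split_ifs <;> omega

-- effect of the pop-loop at the end of iteration i, shared by both branches of stepA
theorem pop_phase (n : Int) (a : List Int) (i : Int) (h1 : 1 ≤ i) (h2 : i ≤ n)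
    (rmv' : List (Int × Int)) (tree1 : List Int)
    (hpw' : List.Pairwise pvLt rmv')
    (hchar' : ∀ p : Int × Int, p ∈ rmv' ↔ 1 ≤ p.2 ∧ p.2 ≤ i ∧ p.1 = xvF n a p.2 ∧ i ≤ p.1)
    (hlen1 : (tree1.length : Int) = n + 2)
    (hsum1 : ∀ q : Int, 0 ≤ q → q ≤ n + 1 →
      bitSumA (q.toNat + 1) tree1 q = cntF n a i q + (if i ≤ q ∧ i ≤ xvF n a i then 1 else 0)) :
    ((popA rmv'.length (n + 1) i tree1 rmv').1.length : Int) = n + 2 ∧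
    (∀ q : Int, 0 ≤ q → q ≤ n + 1 →
      bitSumA (q.toNat + 1) (popA rmv'.length (n + 1) i tree1 rmv').1 q = cntF n a (i + 1) q) ∧
    List.Pairwise pvLt (popA rmv'.length (n + 1) i tree1 rmv').2 ∧
    (∀ p : Int × Int, p ∈ (popA rmv'.length (n + 1) i tree1 rmv').2 ↔
      1 ≤ p.2 ∧ p.2 < i + 1 ∧ p.1 = xvF n a p.2 ∧ i + 1 ≤ p.1) := by
  have hfst : ∀ p ∈ rmv', i ≤ p.1 := fun p hp => ((hchar' p).1 hp).2.2.2
  obtain ⟨hsplit, hgt⟩ := sorted_split i rmv' hpw' hfst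
  have hpop : popA rmv'.length (n + 1) i tree1 rmv' =
      ((rmv'.filter (fun p => p.1 == i)).foldl
          (fun tr p => bitAddA ((n + 1) + 1 - p.2).toNat (n + 1) tr p.2 (-1)) tree1,
       rmv'.filter (fun p => p.1 != i)) := by
    conv_lhs => rw [hsplit]
    refine popA_spec (n + 1) i _ _ _ _ ?_ ?_ ?_
    · intro p hp
      have := List.mem_filter.1 hp
      exact beq_iff_eq.1 this.2
    · intro p hp
      have := List.mem_filter.1 hp
      exact bne_iff_ne.1 this.2
    · rw [List.length_append]
      exact Nat.le_add_right _ _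
  -- membership of the popped block
  have hF1mem : ∀ p : Int × Int, p ∈ rmv'.filter (fun p => p.1 == i) ↔
      1 ≤ p.2 ∧ p.2 ≤ i ∧ xvF n a p.2 = i ∧ p.1 = i := by
    intro p
    rw [List.mem_filter, hchar' p]
    constructor
    · rintro ⟨⟨ha, hb, hc, hd⟩, he⟩
      have he' : p.1 = i := beq_iff_eq.1 he
      exact ⟨ha, hb, by omega, he'⟩
    · rintro ⟨ha, hb, hc, hd⟩
      exact ⟨⟨ha, hb, by omega, by omega⟩, beq_iff_eq.2 hd⟩
  -- the popped block, seen as a set of positions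
  have hcnt : ∀ q : Int,
      ((rmv'.filter (fun p => p.1 == i)).countP (fun p => decide (p.2 ≤ q)) : Int)
        = ((PySem.List.pyRange 1 (i + 1) 1).countP (fun j => decide (j ≤ q ∧ xvF n a j = i)) : Int) := by
    intro q
    have hnd1 : (rmv'.filter (fun p => p.1 == i)).Nodup :=
      pairwise_nodup _ (hpw'.filter _)
    have hnd2 : (((PySem.List.pyRange 1 (i + 1) 1).filter
        (fun j => decide (xvF n a j = i))).map (fun j => ((i : Int), j))).Nodup := by
      refine List.Nodup.map ?_ (((PySem.List.nodup_pyRange_one 1 (i + 1)).filter _))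
      intro u v huv
      simpa using congrArg Prod.snd huv
    have hperm : (rmv'.filter (fun p => p.1 == i)).Perm
        (((PySem.List.pyRange 1 (i + 1) 1).filter
          (fun j => decide (xvF n a j = i))).map (fun j => ((i : Int), j))) := by
      rw [List.perm_ext_iff_of_nodup hnd1 hnd2]
      intro p
      rw [hF1mem p]
      simp only [List.mem_map, List.mem_filter, PySem.List.mem_pyRange_one, decide_eq_true_eq]
      constructor
      · rintro ⟨ha, hb, hc, hd⟩
        exact ⟨p.2, ⟨⟨ha, by omega⟩, hc⟩, by rw [← hd]⟩
      · rintro ⟨j, ⟨⟨hj1, hj2⟩, hj3⟩, hj4⟩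
        obtain ⟨rfl, rfl⟩ : p.1 = i ∧ p.2 = j := by
          constructor <;> rw [← hj4]
        exact ⟨hj1, by omega, hj3, rfl⟩
    rw [hperm.countP_eq, List.countP_map, List.countP_filter]
    congr 2
    funext j
    simp only [Function.comp]
    by_cases hjq : j ≤ q <;> by_cases hxj : xvF n a j = i <;> simp [hjq, hxj]
  refine ⟨?_, ?_, ?_, ?_⟩
  · rw [hpop]
    have := popfold_length (rmv'.filter (fun p => p.1 == i)) (n + 1) tree1
    simp only at this ⊢
    omega
  · intro q hq0 hq1
    rw [hpop]
    have hps := popfold_sum (rmv'.filter (fun p => p.1 == i)) (n + 1) tree1 q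
      (by omega)
      (by
        intro p hp
        have := (hF1mem p).1 hp
        omega)
      hq0 (by omega)
    simp only at hps
    rw [hps, hsum1 q hq0 hq1, hcnt q]
    have := key_ident n a i q h1
    omega
  · rw [hpop]
    exact hpw'.filter _
  · intro p
    rw [hpop]
    simp only [List.mem_filter, bne_iff_ne]
    rw [hchar' p]
    constructor
    · rintro ⟨⟨ha, hb, hc, hd⟩, he⟩
      exact ⟨ha, by omega, hc, by omega⟩
    · rintro ⟨ha, hb, hc, hd⟩
      have hne : p.1 ≠ i := by omega
      have hle : p.2 ≤ i := by omega
      refine ⟨⟨ha, hle, hc, by omega⟩, hne⟩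

-- one iteration: A's res gain equals B's inner count, and the invariant is maintained
theorem step_main (n : Int) (a : List Int) (i : Int) (tree : List Int)
    (rmv : List (Int × Int)) (res : Int) (h1 : 1 ≤ i) (h2 : i ≤ n)
    (hInv : InvA n a i tree rmv) :
    (stepA n a (tree, rmv, res) i).2.2 = stepB n a res i ∧
    InvA n a (i + 1) (stepA n a (tree, rmv, res) i).1 (stepA n a (tree, rmv, res) i).2.1 := by
  obtain ⟨hlen, hsum, hpw, hmem⟩ := hInv
  have hxvi : xvF n a i =
      (if PySem.List.pyGetD a (i - 1) 0 > n then n else PySem.List.pyGetD a (i - 1) 0) := rfl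
  simp only [stepA, stepB]
  obtain ⟨x, hxeq⟩ : ∃ x, (if PySem.List.pyGetD a (i - 1) 0 > n then n
      else PySem.List.pyGetD a (i - 1) 0) = x := ⟨_, rfl⟩
  rw [hxeq] at hxvi
  rw [hxeq]
  have hxn : x ≤ n := by rw [← hxeq]; split <;> omega
  -- pointwise agreement of the counted predicates on [1, i)
  have hcongr : ∀ j, 1 ≤ j → j < i →
      (decide (j ≤ i ∧ i ≤ xvF n a j) = decide (PySem.List.pyGetD a (j - 1) 0 ≥ i)) ∧
      (decide (j ≤ x ∧ i ≤ xvF n a j) = decide (j ≤ x ∧ PySem.List.pyGetD a (j - 1) 0 ≥ i)) := by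
    intro j hj1 hj2
    have : i ≤ xvF n a j ↔ i ≤ PySem.List.pyGetD a (j - 1) 0 := by
      unfold xvF
      split <;> omega
    constructor <;> rw [decide_eq_decide] <;> constructor <;> intro hh <;>
      simp only [ge_iff_le] at * <;> omega
  by_cases hcase : i ≤ x
  · rw [if_pos hcase]
    -- B's bound: a[i-1] >= i, so m = i - 1
    have hai : i ≤ PySem.List.pyGetD a (i - 1) 0 := by
      by_cases hb : PySem.List.pyGetD a (i - 1) 0 > n
      · omega
      · rw [← hxeq] at hcase
        rw [if_neg hb] at hcase
        exact hcase
    rw [if_neg (show ¬ PySem.List.pyGetD a (i - 1) 0 < i - 1 by omega)]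
    have him : i - 1 + 1 = i := by omega
    rw [him]
    constructor
    · -- res gain
      have hq := hsum i (by omega) (by omega)
      have hfc := PySem.List.foldl_count_if
        (fun j => decide (PySem.List.pyGetD a (j - 1) 0 ≥ i)) (PySem.List.pyRange 1 i 1) res
      have hcc : (PySem.List.pyRange 1 i 1).countP (fun j => decide (j ≤ i ∧ i ≤ xvF n a j))
          = (PySem.List.pyRange 1 i 1).countP (fun j => decide (PySem.List.pyGetD a (j - 1) 0 ≥ i)) := by
        refine List.countP_congr ?_
        intro j hj
        rw [PySem.List.mem_pyRange_one] at hj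
        rw [(hcongr j hj.1 hj.2).1]
      simp only [hq, cntF, hcc]
      rw [← hfc]
      congr 1
      funext r j
      split <;> simp_all
    · -- invariant
      have hpp := pop_phase n a i h1 h2 (heapPush (x, i) rmv)
        (bitAddA (n + 2 - i).toNat (n + 1) tree i 1)
        (heapPush_pairwise (x, i) rmv hpw (fun p hp => ((hmem p).1 hp).2.1))
        (by
          intro p
          rw [heapPush_mem, hmem p]
          constructor
          · rintro (rfl | ⟨ha, hb, hc, hd⟩)
            · exact ⟨h1, le_rfl, by rw [hxvi], hcase⟩
            · exact ⟨ha, by omega, hc, hd⟩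
          · rintro ⟨ha, hb, hc, hd⟩
            by_cases hpi : p.2 = i
            · left
              have : p.1 = x := by rw [hc, hpi, hxvi]
              calc p = (p.1, p.2) := rfl
                _ = (x, i) := by rw [this, hpi]
            · right
              exact ⟨ha, by omega, hc, hd⟩)
        (by rw [bitAddA_length]; exact hlen)
        (by
          intro q hq0 hq1
          rw [bit_comm q.toNat q rfl i 1 (n + 1) tree (q.toNat + 1) ((n + 2 - i).toNat)
              hq0 (by omega) (by omega) (by omega) (by omega) (by omega) (by omega)]
          rw [hsum q hq0 hq1, hxvi]
          split_ifs <;> omega)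
      exact ⟨hpp.1, hpp.2.1, hpp.2.2.1, hpp.2.2.2⟩
  · rw [if_neg hcase]
    -- here a[i-1] = x < i, so m = a[i-1] = x
    have hain : ¬ PySem.List.pyGetD a (i - 1) 0 > n := by
      intro hb
      rw [← hxeq, if_pos hb] at hcase
      omega
    have haix : PySem.List.pyGetD a (i - 1) 0 = x := by
      rw [← hxeq, if_neg hain]
    have hm : (if PySem.List.pyGetD a (i - 1) 0 < i - 1 then PySem.List.pyGetD a (i - 1) 0
        else i - 1) = x := by
      split <;> omega
    rw [hm]
    constructor
    · -- res gain
      have hfc := PySem.List.foldl_count_if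
        (fun j => decide (PySem.List.pyGetD a (j - 1) 0 ≥ i)) (PySem.List.pyRange 1 (x + 1) 1) res
      by_cases hx0 : 0 ≤ x
      · have hq := hsum x hx0 (by omega)
        have hccc : (PySem.List.pyRange 1 i 1).countP (fun j => decide (j ≤ x ∧ i ≤ xvF n a j))
            = (PySem.List.pyRange 1 (x + 1) 1).countP
                (fun j => decide (PySem.List.pyGetD a (j - 1) 0 ≥ i)) := by
          rw [PySem.List.pyRange_one_append 1 (x + 1) i (by omega) (by omega),
            List.countP_append]
          have hz : (PySem.List.pyRange (x + 1) i 1).countP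
              (fun j => decide (j ≤ x ∧ i ≤ xvF n a j)) = 0 := by
            rw [List.countP_eq_zero]
            intro j hj
            rw [PySem.List.mem_pyRange_one] at hj
            simp only [decide_eq_true_eq]
            omega
          rw [hz, Nat.add_zero]
          refine List.countP_congr ?_
          intro j hj
          rw [PySem.List.mem_pyRange_one] at hj
          have hji : j < i := by omega
          have h' := (hcongr j hj.1 hji).2
          rw [h']
          have : j ≤ x := by omega
          simp [this]
        simp only [hq, cntF, hccc]
        rw [← hfc]
        congr 1
        funext r j
        split <;> simp_all
      · -- x < 0 : both sides add nothing
        have hxt : x.toNat = 0 := by omega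
        have hnil : PySem.List.pyRange 1 (x + 1) 1 = [] :=
          PySem.List.pyRange_one_eq_nil (by omega)
        rw [hxt, hnil]
        simp only [List.foldl_nil]
        have : bitSumA 1 tree x = 0 := by
          simp only [bitSumA]
          rw [if_neg (by omega)]
        rw [this, add_zero]
    · -- invariant
      have hpp := pop_phase n a i h1 h2 rmv tree hpw
        (by
          intro p
          rw [hmem p]
          constructor
          · rintro ⟨ha, hb, hc, hd⟩
            exact ⟨ha, by omega, hc, hd⟩
          · rintro ⟨ha, hb, hc, hd⟩
            have : p.2 ≠ i := by
              intro he
              rw [he, hxvi] at hc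
              omega
            exact ⟨ha, by omega, hc, hd⟩)
        hlen
        (by
          intro q hq0 hq1
          rw [hsum q hq0 hq1, hxvi]
          rw [if_neg (by omega)]
          omega)
      exact ⟨hpp.1, hpp.2.1, hpp.2.2.1, hpp.2.2.2⟩

theorem loop_main (n : Int) (a : List Int) : ∀ (k : Nat) (i : Int) (tree : List Int)
    (rmv : List (Int × Int)) (res : Int),
    1 ≤ i → i + (k : Int) = n + 1 → InvA n a i tree rmv →
    ((PySem.List.pyRange i (n + 1) 1).foldl (stepA n a) (tree, rmv, res)).2.2
      = (PySem.List.pyRange i (n + 1) 1).foldl (stepB n a) res := by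
  intro k
  induction k with
  | zero =>
    intro i tree rmv res h1 h2 _
    rw [PySem.List.pyRange_one_eq_nil (by omega)]
    rfl
  | succ k ih =>
    intro i tree rmv res h1 h2 hInv
    rw [PySem.List.pyRange_one_cons (show i < n + 1 by push_cast at h2; omega)]
    simp only [List.foldl_cons]
    obtain ⟨hres, hInv'⟩ := step_main n a i tree rmv res h1 (by push_cast at h2; omega) hInv
    have heta : stepA n a (tree, rmv, res) i = ((stepA n a (tree, rmv, res) i).1,
        (stepA n a (tree, rmv, res) i).2.1, (stepA n a (tree, rmv, res) i).2.2) := rfl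
    rw [heta, hres]
    exact ih (i + 1) (stepA n a (tree, rmv, res) i).1 (stepA n a (tree, rmv, res) i).2.1
      (stepB n a res i) (by omega) (by push_cast at h2 ⊢; omega) hInv'

-- ===== VERDICT (by name: the statement is the Claim_ definition above) =====
theorem solve_spec : Claim_equal_solve := by
  intro n a _ _
  unfold Spec_solve solve solve_alt
  by_cases hn : 1 ≤ n
  · refine loop_main n a n.toNat 1 _ [] 0 le_rfl (by omega) ?_
    refine ⟨by simp; omega, ?_, List.Pairwise.nil, ?_⟩
    · intro q hq0 hq1
      rw [bitSumA_zero _ _ _ (by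
        intro k
        simp only [List.getD_eq_getElem?_getD, List.getElem?_replicate]
        split <;> simp)]
      unfold cntF
      rw [PySem.List.pyRange_one_eq_nil le_rfl]
      simp
    · intro p
      simp only [List.not_mem_nil, false_iff]
      intro h
      omega
  · rw [PySem.List.pyRange_one_eq_nil (by omega)]
    rfl
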